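-- pv_equiv track=rewrite | github.com/mironleon/ara-tools | aratools/formatting.py | equal_division_generator
-- ===== SOURCE A (Python) =====
-- from collections.abc import Generator, Sequence
--
-- def equal_division_generator(
--     numerator: int, denominator: int
-- ) -> Generator[int, None, None]:
--     """
--     Divide an integer into equally sized blocks and yield them.
--     If the remainder has value X, than the first X yielded values
--     will be increased by 1.
--     """
--     assert numerator >= 0 and denominator > 0
--     if numerator == 0:
--         for _ in range(denominator):
--             yield 0
--     remainder = numerator % denominator
--     ratio = numerator // denominator
--     while numerator > 0:
--         if remainder > 0:
--             result = ratio + 1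
--             remainder -= 1
--         else:
--             result = ratio
--         yield result
--         numerator -= result
-- ===== SOURCE B (Python) =====
-- def equal_division_generator(numerator, denominator):
--     assert numerator >= 0 and denominator > 0
--     if numerator == 0:
--         for _ in range(denominator):
--             yield 0
--         return
--     ratio, remainder = divmod(numerator, denominator)
--     count = denominator if ratio > 0 else remainder
--     for i in range(count):
--         yield ratio + (1 if i < remainder else 0)
-- ===== Notes on version B (the rewrite author's own statement) =====
-- stated objective: simpler
-- what changed: Replaces A's while-loop that repeatedly subtracts each emitted block from a running numerator with a direct index-based loop of precomputed length (count = denominator if ratio > 0 else remainder), emitting ratio+1 for the first `remainder` indices.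
import Mathlib
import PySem

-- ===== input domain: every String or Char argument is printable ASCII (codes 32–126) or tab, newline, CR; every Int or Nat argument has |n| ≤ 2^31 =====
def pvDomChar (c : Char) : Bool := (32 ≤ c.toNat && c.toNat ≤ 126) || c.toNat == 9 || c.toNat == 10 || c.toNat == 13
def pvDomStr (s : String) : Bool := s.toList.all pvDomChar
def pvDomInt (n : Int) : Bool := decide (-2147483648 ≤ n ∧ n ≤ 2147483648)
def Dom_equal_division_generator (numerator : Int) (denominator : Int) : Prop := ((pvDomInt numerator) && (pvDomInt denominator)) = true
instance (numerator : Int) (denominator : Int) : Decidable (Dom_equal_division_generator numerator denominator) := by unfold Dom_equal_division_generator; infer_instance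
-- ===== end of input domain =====

-- B replaces A's while-loop over a running numerator with an index loop of precomputed length (simpler decomposition, same cost).

-- ===== PORT A =====
-- A's `while numerator > 0` loop; fuel = numerator.toNat suffices under the assert
-- (each iteration subtracts at least 1 from numerator while the loop continues).
def edgLoopA (fuel : Nat) (numerator remainder ratio : Int) : List Int :=
  match fuel with
  | 0 => []
  | fuel + 1 =>
    if numerator > 0 then
      if remainder > 0 then
        (ratio + 1) :: edgLoopA fuel (numerator - (ratio + 1)) (remainder - 1) ratio
      else
        ratio :: edgLoopA fuel (numerator - ratio) remainder ratio
    else []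

def equal_division_generator (numerator : Int) (denominator : Int) : List Int :=
  (if numerator == 0 then (PySem.List.pyRange 0 denominator 1).map (fun _ => (0 : Int)) else [])
  ++ edgLoopA numerator.toNat numerator (PySem.Int.mod numerator denominator)
      (PySem.Int.floordiv numerator denominator)

-- ===== PORT B =====
-- ratio / remainder / count are bound by Python's divmod and conditional; inlined here.
def equal_division_generator_alt (numerator : Int) (denominator : Int) : List Int :=
  if numerator == 0 then
    (PySem.List.pyRange 0 denominator 1).map (fun _ => (0 : Int))
  else
    (PySem.List.pyRange 0
        (if PySem.Int.floordiv numerator denominator > 0 then denominator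
         else PySem.Int.mod numerator denominator) 1).map
      (fun i => PySem.Int.floordiv numerator denominator +
        (if i < PySem.Int.mod numerator denominator then 1 else 0))

-- ===== PRECONDITION & SPEC =====
-- Pre_: exactly the assert in A; on any other input A raises AssertionError at once.
def Pre_equal_division_generator (numerator : Int) (denominator : Int) : Prop :=
  numerator ≥ 0 ∧ denominator > 0
instance (numerator : Int) (denominator : Int) : Decidable (Pre_equal_division_generator numerator denominator) := by unfold Pre_equal_division_generator; infer_instance

def pvWitness_equal_division_generator : Int × Int := (7, 3)

def Spec_equal_division_generator (numerator : Int) (denominator : Int) (out : List Int) : Prop := out = equal_division_generator_alt numerator denominator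
instance (numerator : Int) (denominator : Int) (out : List Int) : Decidable (Spec_equal_division_generator numerator denominator out) := by unfold Spec_equal_division_generator; infer_instance

-- ===== CLAIM (what is proved, stated in full; the proofs are below) =====
def Claim_equal_equal_division_generator : Prop := ∀ (numerator : Int) (denominator : Int), Dom_equal_division_generator numerator denominator → Pre_equal_division_generator numerator denominator → Spec_equal_division_generator numerator denominator (equal_division_generator numerator denominator)

-- ===== LEMMAS AND PROOFS =====

-- A's loop with ratio q > 0: with j iterations left and remainder r' (numerator = q*j + r'),
-- it yields r' copies of (q+1) followed by (j - r') copies of q.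
lemma edgLoopA_pos (q : Int) (hq : 0 < q) :
    ∀ (j : Nat) (r' : Int) (fuel : Nat), 0 ≤ r' → r'.toNat ≤ j → j ≤ fuel →
      edgLoopA fuel (q * j + r') r' q
        = List.replicate r'.toNat (q + 1) ++ List.replicate (j - r'.toNat) q := by
  intro j
  induction j with
  | zero =>
    intro r' fuel h0 hle _
    have hr : r' = 0 := by omega
    subst hr
    cases fuel with
    | zero => simp [edgLoopA]
    | succ f => simp [edgLoopA]
  | succ j ih =>
    intro r' fuel h0 hle hfuel
    obtain ⟨f, rfl⟩ : ∃ f, fuel = f + 1 := ⟨fuel - 1, by omega⟩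
    have hqj : 0 ≤ q * (j : Int) := by positivity
    have hmul : q * ((j + 1 : Nat) : Int) = q * (j : Int) + q := by push_cast; ring
    have hpos : q * ((j + 1 : Nat) : Int) + r' > 0 := by rw [hmul]; linarith
    by_cases hr : r' > 0
    · simp only [edgLoopA]
      rw [if_pos hpos, if_pos hr]
      rw [show q * ((j + 1 : Nat) : Int) + r' - (q + 1) = q * (j : Int) + (r' - 1) by
        push_cast; ring]
      rw [ih (r' - 1) f (by omega) (by omega) (by omega)]
      rw [show r'.toNat = (r' - 1).toNat + 1 by omega,
          show j + 1 - ((r' - 1).toNat + 1) = j - (r' - 1).toNat by omega,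
          List.replicate_succ, List.cons_append]
    · have hr0 : r' = 0 := by omega
      subst hr0
      simp only [edgLoopA]
      rw [if_pos hpos, if_neg (by omega : ¬ (0 : Int) > 0)]
      rw [show q * ((j + 1 : Nat) : Int) + 0 - q = q * (j : Int) + 0 by push_cast; ring]
      rw [ih 0 f (by omega) (by omega) (by omega)]
      simp [List.replicate_succ]

-- A's loop with ratio 0 and numerator = remainder = k: yields k ones.
lemma edgLoopA_zero :
    ∀ (k fuel : Nat), k ≤ fuel →
      edgLoopA fuel (k : Int) (k : Int) 0 = List.replicate k 1 := by
  intro k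
  induction k with
  | zero =>
    intro fuel _
    cases fuel with
    | zero => simp [edgLoopA]
    | succ f => simp [edgLoopA]
  | succ k ih =>
    intro fuel hf
    obtain ⟨f, rfl⟩ : ∃ f, fuel = f + 1 := ⟨fuel - 1, by omega⟩
    have h1 : ((k + 1 : Nat) : Int) > 0 := by push_cast; omega
    simp only [edgLoopA]
    rw [if_pos h1, if_pos h1]
    rw [show ((k + 1 : Nat) : Int) - (0 + 1) = (k : Int) by push_cast; ring,
        show ((k + 1 : Nat) : Int) - 1 = (k : Int) by push_cast; ring]
    rw [ih f (by omega)]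
    simp [List.replicate_succ]

-- B's comprehension over range(c) splits into the two replicate blocks.
lemma map_range_split (q : Int) :
    ∀ (c rn : Nat), rn ≤ c →
      (List.range c).map (fun i : Nat => q + (if (i : Int) < (rn : Int) then 1 else 0))
        = List.replicate rn (q + 1) ++ List.replicate (c - rn) q := by
  intro c
  induction c with
  | zero =>
    intro rn h
    have : rn = 0 := by omega
    subst this
    simp
  | succ c ih =>
    intro rn h
    cases rn with
    | zero =>
      rw [show List.replicate 0 (q + 1) ++ List.replicate (c + 1 - 0) q
            = (List.range (c + 1)).map (fun _ : Nat => q) by simp]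
      apply List.map_congr_left
      intro i _
      rw [if_neg (by push_cast; omega), add_zero]
    | succ s =>
      rw [List.range_succ_eq_map, List.map_cons, List.map_map]
      rw [show (q + (if ((0 : Nat) : Int) < ((s + 1 : Nat) : Int) then 1 else 0)) = q + 1 by
        rw [if_pos (by push_cast; omega)]]
      rw [List.map_congr_left (l := List.range c)
        (g := fun i : Nat => q + (if (i : Int) < (s : Int) then 1 else 0))
        (by
          intro i _
          simp only [Function.comp_apply, Nat.succ_eq_add_one]
          congr 1
          push_cast
          split_ifs with h1 h2 <;> omega)]
      rw [ih s (by omega)]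
      rw [show c + 1 - (s + 1) = c - s by omega, List.replicate_succ, List.cons_append]

-- pyRange 0 c 1 mapped = range c.toNat mapped.
lemma map_pyRange_eq (c : Int) (f : Int → Int) :
    (PySem.List.pyRange 0 c 1).map f = (List.range c.toNat).map (fun k : Nat => f (k : Int)) := by
  rw [PySem.List.pyRange_one]
  simp [List.map_map, Function.comp_def]

-- ===== VERDICT (by name: the statement is the Claim_ definition above) =====
theorem equal_division_generator_spec : Claim_equal_equal_division_generator := by
  intro n d _ hpre
  obtain ⟨hn, hd⟩ := hpre
  unfold Spec_equal_division_generator equal_division_generator equal_division_generator_alt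
  by_cases h0 : n = 0
  · subst h0
    simp [edgLoopA, PySem.Int.mod, PySem.Int.floordiv]
  · have hn' : 0 < n := lt_of_le_of_ne hn (Ne.symm h0)
    rw [if_neg (by simpa using h0), if_neg (by simpa using h0), List.nil_append]
    set q := PySem.Int.floordiv n d with hqdef
    set r := PySem.Int.mod n d with hrdef
    have hqr : q * d + r = n := PySem.Int.floordiv_mul_add_mod n d
    have hq : q = n / d := PySem.Int.floordiv_eq_ediv_of_pos hd
    have hr : r = n % d := PySem.Int.mod_eq_emod_of_pos hd
    have hr0 : 0 ≤ r := by rw [hr]; exact Int.emod_nonneg n (by omega)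
    have hrd : r < d := by rw [hr]; exact Int.emod_lt_of_pos n hd
    have hq0 : 0 ≤ q := by rw [hq]; exact Int.ediv_nonneg hn (by omega)
    have hcast : ∀ l : List Nat,
        l.map (fun k : Nat => q + (if (k : Int) < r then 1 else 0))
          = l.map (fun k : Nat => q + (if (k : Int) < (r.toNat : Int) then 1 else 0)) := by
      intro l
      apply List.map_congr_left
      intro k _
      congr 1
      rw [Int.toNat_of_nonneg hr0]
    by_cases hqpos : q > 0
    · rw [if_pos hqpos]
      have hdn : d ≤ n := by
        have h1 : 1 * d ≤ q * d := mul_le_mul_of_nonneg_right (by omega) (by omega)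
        rw [one_mul] at h1
        omega
      have hA := edgLoopA_pos q hqpos d.toNat r n.toNat hr0 (by omega) (by omega)
      rw [show q * (d.toNat : Int) + r = n by rw [Int.toNat_of_nonneg (by omega)]; omega] at hA
      rw [hA, map_pyRange_eq, hcast, map_range_split q d.toNat r.toNat (by omega)]
    · rw [if_neg hqpos]
      have hq0' : q = 0 := by omega
      have hnr : n = r := by
        have hz : q * d = 0 := by rw [hq0']; ring
        omega
      have hA := edgLoopA_zero r.toNat r.toNat (le_refl _)
      rw [Int.toNat_of_nonneg hr0] at hA
      conv_lhs => rw [hq0', hnr]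
      rw [hA, map_pyRange_eq, hcast, map_range_split q r.toNat r.toNat (le_refl _)]
      simp [hq0']
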